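-- pv_equiv track=rewrite | github.com/colpim2/Criptografia | program.py | texto_a_matriz
-- ===== SOURCE A (Python) =====
-- def texto_a_matriz(texto,textoMatriz):
--   aux1 = 0
--   aux2 = 0
--   for i in range(len(texto)):
--     if i % 2 == 0:
--       #Se resta 65 para convertir de Ascii a rango 0-26
--       textoMatriz[0][aux1] = int(ord(texto[i]) - 65)
--       aux1 += 1
--     else:
--       textoMatriz[1][aux2] = int(ord(texto[i]) - 65)
--       aux2 += 1
--   return textoMatriz
-- ===== SOURCE B (Python) =====
-- def texto_a_matriz(texto, textoMatriz):
--   # Split by index parity with stride slices, then two plain enumerate loops.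
--   # Mutates textoMatriz in place, like the original.
--   for j, c in enumerate(texto[0::2]):
--     textoMatriz[0][j] = ord(c) - 65
--   for j, c in enumerate(texto[1::2]):
--     textoMatriz[1][j] = ord(c) - 65
--   return textoMatriz
-- ===== Notes on version B (the rewrite author's own statement) =====
-- stated objective: simpler
-- what changed: Replaces the single interleaved loop with parity test and two manual position counters by stride slicing (texto[0::2], texto[1::2]) and two enumerate loops, one per matrix row.
import Mathlib
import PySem

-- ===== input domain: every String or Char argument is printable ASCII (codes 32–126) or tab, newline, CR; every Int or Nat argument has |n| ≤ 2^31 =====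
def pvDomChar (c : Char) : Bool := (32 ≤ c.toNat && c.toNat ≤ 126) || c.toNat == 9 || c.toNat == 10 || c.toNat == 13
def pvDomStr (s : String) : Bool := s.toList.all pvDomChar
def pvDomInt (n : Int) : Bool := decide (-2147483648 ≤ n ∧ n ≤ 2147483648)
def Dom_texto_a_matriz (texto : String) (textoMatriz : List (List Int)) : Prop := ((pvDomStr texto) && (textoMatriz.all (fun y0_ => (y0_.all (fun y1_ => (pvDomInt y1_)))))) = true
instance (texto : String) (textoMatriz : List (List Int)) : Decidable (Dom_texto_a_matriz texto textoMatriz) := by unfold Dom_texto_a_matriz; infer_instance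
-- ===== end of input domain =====

-- B replaces A's single interleaved parity loop with its two manual counters by stride slicing
-- (texto[0::2] / texto[1::2]) and two plain enumerate loops, one per matrix row: a simpler
-- decomposition, same O(n) cost.  Both Pythons mutate textoMatriz in place; on Pre_ the final
-- mutated state coincides with the returned value, and the theorems here are about the return value.

-- shared semantic helper: the Python statement 'm[r][j] = v' on a list of lists
def setCell (m : List (List Int)) (r j : Nat) (v : Int) : List (List Int) :=
  m.set r ((m.getD r []).set j v)

-- ===== PORT A =====
def texto_a_matriz (texto : String) (textoMatriz : List (List Int)) : List (List Int) :=
  let cs := texto.toList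
  ((List.range cs.length).foldl
    (fun (s : Nat × Nat × List (List Int)) i =>
      if i % 2 == 0 then
        (s.1 + 1, s.2.1, setCell s.2.2 0 s.1 (((cs.getD i ' ').toNat : Int) - 65))
      else
        (s.1, s.2.1 + 1, setCell s.2.2 1 s.2.1 (((cs.getD i ' ').toNat : Int) - 65)))
    (0, 0, textoMatriz)).2.2

-- ===== PORT B =====
def texto_a_matriz_alt (texto : String) (textoMatriz : List (List Int)) : List (List Int) :=
  let cs := texto.toList
  let evens := (PySem.List.slice? cs (some 0) none 2).getD []
  let odds := (PySem.List.slice? cs (some 1) none 2).getD []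
  let m1 := (PySem.List.enumerate evens).foldl
      (fun mm p => setCell mm 0 p.1.toNat ((p.2.toNat : Int) - 65)) textoMatriz
  (PySem.List.enumerate odds).foldl
      (fun mm p => setCell mm 1 p.1.toNat ((p.2.toNat : Int) - 65)) m1

-- ===== PRECONDITION & SPEC =====
-- Pre_ excludes exactly the inputs on which Python A raises IndexError: a nonempty text needs a
-- row 0 of length ≥ ceil(n/2), and a text of length ≥ 2 also needs a row 1 of length ≥ floor(n/2).
def Pre_texto_a_matriz (texto : String) (textoMatriz : List (List Int)) : Prop :=
  (1 ≤ texto.toList.length →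
     1 ≤ textoMatriz.length ∧ (texto.toList.length + 1) / 2 ≤ (textoMatriz.getD 0 []).length) ∧
  (2 ≤ texto.toList.length →
     2 ≤ textoMatriz.length ∧ texto.toList.length / 2 ≤ (textoMatriz.getD 1 []).length)
instance (texto : String) (textoMatriz : List (List Int)) : Decidable (Pre_texto_a_matriz texto textoMatriz) := by unfold Pre_texto_a_matriz; infer_instance

def pvWitness_texto_a_matriz : String × List (List Int) := ("ABC", [[0, 0], [0]])

def Spec_texto_a_matriz (texto : String) (textoMatriz : List (List Int)) (out : List (List Int)) : Prop := out = texto_a_matriz_alt texto textoMatriz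
instance (texto : String) (textoMatriz : List (List Int)) (out : List (List Int)) : Decidable (Spec_texto_a_matriz texto textoMatriz out) := by unfold Spec_texto_a_matriz; infer_instance

-- ===== CLAIM (what is proved, stated in full; the proofs are below) =====
def Claim_equal_texto_a_matriz : Prop := ∀ (texto : String) (textoMatriz : List (List Int)), Dom_texto_a_matriz texto textoMatriz → Pre_texto_a_matriz texto textoMatriz → Spec_texto_a_matriz texto textoMatriz (texto_a_matriz texto textoMatriz)

-- ===== LEMMAS AND PROOFS =====

-- every-other-element of a list (the value of the Python slice xs[0::2])
def strided {α : Type} : List α → List α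
  | [] => []
  | c :: cs => c :: strided cs.tail
termination_by l => l.length
decreasing_by simp [List.length_tail]

-- sequential writes into one row, at consecutive positions
def writeSeq (m : List (List Int)) (r : Nat) (j : Nat) : List Char → List (List Int)
  | [] => m
  | c :: row => writeSeq (setCell m r j ((c.toNat : Int) - 65)) r (j + 1) row

-- A's interleaved loop as structural recursion; the flag says "current index is even"
def specGo : List Char → Bool → Nat → Nat → List (List Int) → List (List Int)
  | [], _, _, _, m => m
  | c :: cs, true, a1, a2, m => specGo cs false (a1 + 1) a2 (setCell m 0 a1 ((c.toNat : Int) - 65))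
  | c :: cs, false, a1, a2, m => specGo cs true a1 (a2 + 1) (setCell m 1 a2 ((c.toNat : Int) - 65))

theorem setCell_comm (m : List (List Int)) (i j : Nat) (v w : Int) :
    setCell (setCell m 0 i w) 1 j v = setCell (setCell m 1 j v) 0 i w := by
  simp [setCell, List.getD_eq_getElem?_getD]
  exact List.set_comm _ _ (by omega)

theorem writeSeq_setCell (m : List (List Int)) (i : Nat) (w : Int) (j : Nat) (row : List Char) :
    writeSeq (setCell m 0 i w) 1 j row = setCell (writeSeq m 1 j row) 0 i w := by
  induction row generalizing m j with
  | nil => rfl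
  | cons c cs ih => simp only [writeSeq]; rw [setCell_comm, ih]

theorem writeSeq_comm (m : List (List Int)) (i j : Nat) (r0 r1 : List Char) :
    writeSeq (writeSeq m 0 i r0) 1 j r1 = writeSeq (writeSeq m 1 j r1) 0 i r0 := by
  induction r0 generalizing m i with
  | nil => rfl
  | cons c cs ih => simp only [writeSeq]; rw [ih, writeSeq_setCell]

theorem specGo_eq_writeSeq : ∀ (cs : List Char) (a1 a2 : Nat) (m : List (List Int)),
    (specGo cs true a1 a2 m = writeSeq (writeSeq m 0 a1 (strided cs)) 1 a2 (strided cs.tail)) ∧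
    (specGo cs false a1 a2 m = writeSeq (writeSeq m 1 a2 (strided cs)) 0 a1 (strided cs.tail))
  | [], a1, a2, m => by simp [specGo, strided, writeSeq]
  | c :: cs, a1, a2, m => by
    constructor
    · rw [specGo, (specGo_eq_writeSeq cs (a1+1) a2 _).2]
      simp only [strided, List.tail_cons, writeSeq]
      rw [writeSeq_comm]
    · rw [specGo, (specGo_eq_writeSeq cs a1 (a2+1) _).1]
      simp only [strided, List.tail_cons, writeSeq]
      rw [writeSeq_comm]
termination_by cs => cs.length

theorem aLoop_eq_specGo (cs : List Char) : ∀ (k j a1 a2 : Nat) (m : List (List Int)),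
    j + k = cs.length →
    ((List.range' j k).foldl
      (fun (s : Nat × Nat × List (List Int)) i =>
        if i % 2 == 0 then
          (s.1 + 1, s.2.1, setCell s.2.2 0 s.1 (((cs.getD i ' ').toNat : Int) - 65))
        else
          (s.1, s.2.1 + 1, setCell s.2.2 1 s.2.1 (((cs.getD i ' ').toNat : Int) - 65)))
      (a1, a2, m)).2.2
    = specGo (cs.drop j) (j % 2 == 0) a1 a2 m := by
  intro k
  induction k with
  | zero =>
    intro j a1 a2 m hj
    have : cs.drop j = [] := by
      apply List.drop_eq_nil_of_le; omega
    simp [this, specGo]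
  | succ k ih =>
    intro j a1 a2 m hj
    have hjlt : j < cs.length := by omega
    have hdrop : cs.drop j = cs[j] :: cs.drop (j+1) := List.drop_eq_getElem_cons hjlt
    have hget : cs.getD j ' ' = cs[j] := by
      rw [List.getD_eq_getElem?_getD, List.getElem?_eq_getElem hjlt]; rfl
    rw [List.range'_succ, List.foldl_cons]
    by_cases hpar : j % 2 = 0
    · simp only [hget, hpar, beq_self_eq_true, if_pos]
      rw [ih (j+1) (a1+1) a2 _ (by omega)]
      rw [hdrop]
      have h1 : ((j+1) % 2 == 0) = false := by
        simp [Nat.add_mod, hpar]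
      rw [h1, specGo]
    · have h0 : (j % 2 == 0) = false := by simp [hpar]
      simp only [hget, h0, Bool.false_eq_true, if_neg, not_false_iff]
      rw [ih (j+1) a1 (a2+1) _ (by omega)]
      rw [hdrop]
      have h1 : ((j+1) % 2 == 0) = true := by
        simp [Nat.add_mod]; omega
      rw [h1, specGo]

theorem enumLoop_eq_writeSeq (r : Nat) (row : List Char) : ∀ (s : Nat) (m : List (List Int)),
    (PySem.List.enumerate row (s : Int)).foldl
      (fun mm p => setCell mm r p.1.toNat ((p.2.toNat : Int) - 65)) m
    = writeSeq m r s row := by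
  induction row with
  | nil => intro s m; simp [PySem.List.enumerate_nil, writeSeq]
  | cons c cs ih =>
    intro s m
    rw [PySem.List.enumerate_cons]
    have h1 : ((s : Int) + 1) = ((s + 1 : Nat) : Int) := by push_cast; ring
    simp only [List.foldl_cons, Int.toNat_natCast, h1, ih]
    rfl

theorem stride_key {α : Type} : ∀ (xs : List α),
    List.filterMap (fun k => xs[2*k]?) (List.range ((xs.length+1)/2)) = strided xs
  | [] => by simp [strided]
  | a :: t => by
    rw [strided]
    have hc : ((a :: t).length + 1)/2 = (t.tail.length + 1)/2 + 1 := by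
      cases t <;> simp <;> omega
    rw [hc, List.range_succ_eq_map, List.filterMap_cons, List.filterMap_map]
    have h0 : (a :: t)[2*0]? = some a := by simp
    simp only [h0]
    have hf : (fun k => (a :: t)[2*k]?) ∘ Nat.succ = fun k => t.tail[2*k]? := by
      funext k
      cases t with
      | nil => simp [Function.comp]
      | cons b t' =>
        show (a :: b :: t')[2*(k+1)]? = t'[2*k]?
        have : 2*(k+1) = (2*k) + 1 + 1 := by omega
        rw [this]
        simp
    rw [hf, stride_key t.tail]
termination_by xs => xs.length
decreasing_by simp [List.length_tail]

theorem slice2_zero {α : Type} (xs : List α) :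
    PySem.List.slice? xs (some 0) none 2 = some (strided xs) := by
  unfold PySem.List.slice? PySem.List.sliceIndices
  norm_num
  have hc : (if 0 < xs.length then (((xs.length : Int) + 2 - 1) / 2).toNat else 0)
      = (xs.length + 1)/2 := by split <;> omega
  have hf : (fun x : Nat => xs[(2 * (x:Int)).toNat]?) = fun k => xs[2*k]? := by
    funext k
    have : (2 * (k:Int)).toNat = 2*k := by omega
    rw [this]
  rw [hc, hf, stride_key]

theorem slice2_one {α : Type} (xs : List α) :
    PySem.List.slice? xs (some 1) none 2 = some (strided xs.tail) := by
  unfold PySem.List.slice? PySem.List.sliceIndices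
  norm_num
  cases xs with
  | nil => simp [strided]
  | cons a t =>
    have hc : (if 1 < (a :: t).length then ((((a :: t).length : Int) - min 1 ((a :: t).length : Int) + 2 - 1) / 2).toNat else 0)
        = (t.length + 1)/2 := by
      simp only [List.length_cons]
      split <;> omega
    have hf : (fun x : Nat => (a :: t)[(min 1 (((a :: t).length : Int)) + 2 * (x:Int)).toNat]?)
        = fun k => t[2*k]? := by
      funext k
      have h1 : min 1 (((a :: t).length : Int)) = 1 := by simp
      rw [h1]
      have : (1 + 2 * (k:Int)).toNat = (2*k) + 1 := by omega
      rw [this]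
      simp
    rw [hc, hf, stride_key]
    rfl

-- ===== VERDICT (by name: the statement is the Claim_ definition above) =====
theorem texto_a_matriz_spec : Claim_equal_texto_a_matriz := by
  intro texto m _ _
  unfold Spec_texto_a_matriz
  simp only [texto_a_matriz, texto_a_matriz_alt]
  rw [slice2_zero, slice2_one]
  simp only [Option.getD_some]
  have hA := aLoop_eq_specGo texto.toList texto.toList.length 0 0 0 m (by omega)
  rw [← List.range_eq_range'] at hA
  rw [hA]
  have he0 := enumLoop_eq_writeSeq 0 (strided texto.toList) 0 m
  have he1 := enumLoop_eq_writeSeq 1 (strided texto.toList.tail) 0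
    (writeSeq m 0 0 (strided texto.toList))
  simp only [Nat.cast_zero] at he0 he1
  rw [he0, he1, List.drop_zero]
  exact (specGo_eq_writeSeq texto.toList 0 0 m).1
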